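-- pv_equiv track=rewrite | github.com/perekatypole/tasks_py | lessons1-4/6.48.py | min_digit_index
-- ===== SOURCE A (Python) =====
-- def min_digit_index(n):
--     min_digit = n % 10
--     index = 0
--     pos = 0
--     while n > 0:
--         digit = n % 10
--         pos += 1
--         if digit <= min_digit:
--             min_digit = digit
--             index = pos
--         n //= 10
--     return index
-- ===== SOURCE B (Python) =====
-- def min_digit_index(n):
--     digits = []
--     while n > 0:
--         digits.append(n % 10)
--         n //= 10
--     if not digits:
--         return 0
--     m = min(digits)
--     return len(digits) - digits[::-1].index(m)
-- ===== Notes on version B (the rewrite author's own statement) =====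
-- stated objective: alternative
-- what changed: B materialises the digit list once, then computes the minimum with min() and locates its most-significant occurrence via a reversed-list index, instead of A's single fused running-minimum loop with manual position bookkeeping.
import Mathlib
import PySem

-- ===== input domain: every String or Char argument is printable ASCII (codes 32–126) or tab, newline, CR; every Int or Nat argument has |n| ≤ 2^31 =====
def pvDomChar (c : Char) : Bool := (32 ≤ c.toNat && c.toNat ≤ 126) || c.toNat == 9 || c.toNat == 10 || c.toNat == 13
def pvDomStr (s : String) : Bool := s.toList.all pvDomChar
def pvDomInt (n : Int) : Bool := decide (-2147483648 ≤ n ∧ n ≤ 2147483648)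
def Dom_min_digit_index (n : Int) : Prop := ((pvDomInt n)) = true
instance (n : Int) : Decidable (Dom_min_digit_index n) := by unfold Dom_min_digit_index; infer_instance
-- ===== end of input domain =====

-- B rebuilds the answer from a materialised digit list (min + reversed index) instead of A's fused running-minimum loop; objective: alternative decomposition.

-- ===== PORT A =====
def minDigitIndexLoop (n min_digit index pos : Int) : Int :=
  if _h : n > 0 then
    let digit := PySem.Int.mod n 10
    let pos' := pos + 1
    if digit ≤ min_digit then
      minDigitIndexLoop (PySem.Int.floordiv n 10) digit pos' pos'
    else
      minDigitIndexLoop (PySem.Int.floordiv n 10) min_digit index pos'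
  else index
termination_by n.toNat
decreasing_by
  all_goals
    rw [PySem.Int.floordiv_eq_ediv_of_pos (by omega)]; omega

def min_digit_index (n : Int) : Int :=
  minDigitIndexLoop n (PySem.Int.mod n 10) 0 0

-- ===== PORT B =====
def digitsLoop (n : Int) (acc : List Int) : List Int :=
  if _h : n > 0 then
    digitsLoop (PySem.Int.floordiv n 10) (acc ++ [PySem.Int.mod n 10])
  else acc
termination_by n.toNat
decreasing_by
  rw [PySem.Int.floordiv_eq_ediv_of_pos (by omega)]; omega

def min_digit_index_alt (n : Int) : Int :=
  let digits := digitsLoop n []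
  if digits.isEmpty then 0
  else
    match PySem.List.min? digits id with
    | none => 0      -- unreachable: digits nonempty
    | some m =>
      match PySem.List.index? ((PySem.List.slice? digits none none (-1)).getD []) m with
      | some j => PySem.List.len digits - (j : Int)
      | none => 0    -- unreachable: m ∈ digits

-- ===== PRECONDITION & SPEC =====
def Spec_min_digit_index (n : Int) (out : Int) : Prop := out = min_digit_index_alt n
instance (n : Int) (out : Int) : Decidable (Spec_min_digit_index n out) := by unfold Spec_min_digit_index; infer_instance

-- ===== CLAIM (what is proved, stated in full; the proofs are below) =====
def Claim_equal_min_digit_index : Prop := ∀ (n : Int), Dom_min_digit_index n → Spec_min_digit_index n (min_digit_index n)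

-- ===== LEMMAS AND PROOFS =====

-- A's fused loop, replayed over an already-extracted digit list.
def listLoop : List Int → Int → Int → Int → Int
  | [], _, idx, _ => idx
  | d :: ds, md, idx, pos =>
    if d ≤ md then listLoop ds d (pos + 1) (pos + 1)
    else listLoop ds md idx (pos + 1)

-- index (0-based) of the LAST occurrence of m in ds, if any
def lastEq : List Int → Int → Option Nat
  | [], _ => none
  | d :: ds, m =>
    match lastEq ds m with
    | some k => some (k + 1)
    | none => if d = m then some 0 else none

theorem digitsLoop_acc (k : Nat) (n : Int) (hk : n.toNat = k) (acc : List Int) :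
    digitsLoop n acc = acc ++ digitsLoop n [] := by
  induction k using Nat.strong_induction_on generalizing n acc with
  | _ k ih =>
    conv_lhs => rw [digitsLoop.eq_def]
    conv_rhs => rw [digitsLoop.eq_def]
    by_cases h : n > 0
    · simp only [h, dite_true]
      have hd : PySem.Int.floordiv n 10 = n / 10 :=
        PySem.Int.floordiv_eq_ediv_of_pos (by omega)
      have hlt : (PySem.Int.floordiv n 10).toNat < k := by rw [hd]; omega
      simp only [List.nil_append]
      rw [ih _ hlt _ rfl (acc ++ [PySem.Int.mod n 10]), ih _ hlt _ rfl [PySem.Int.mod n 10]]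
      simp
    · simp [h]

theorem digitsLoop_pos (n : Int) (h : n > 0) :
    digitsLoop n [] = PySem.Int.mod n 10 :: digitsLoop (PySem.Int.floordiv n 10) [] := by
  conv_lhs => rw [digitsLoop.eq_def]
  simp only [h, dite_true, List.nil_append]
  exact digitsLoop_acc _ _ rfl _

theorem minDigitIndexLoop_eq_listLoop (k : Nat) (n : Int) (hk : n.toNat = k)
    (md idx pos : Int) :
    minDigitIndexLoop n md idx pos = listLoop (digitsLoop n []) md idx pos := by
  induction k using Nat.strong_induction_on generalizing n md idx pos with
  | _ k ih =>
    by_cases h : n > 0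
    · have hd : PySem.Int.floordiv n 10 = n / 10 :=
        PySem.Int.floordiv_eq_ediv_of_pos (by omega)
      have hlt : (PySem.Int.floordiv n 10).toNat < k := by rw [hd]; omega
      rw [digitsLoop_pos n h]
      conv_lhs => rw [minDigitIndexLoop.eq_def]
      simp only [h, dite_true, listLoop]
      by_cases hle : PySem.Int.mod n 10 ≤ md
      · simp only [hle, if_true]; exact ih _ hlt _ rfl _ _ _
      · simp only [hle, if_false]; exact ih _ hlt _ rfl _ _ _
    · conv_lhs => rw [minDigitIndexLoop.eq_def]
      conv_rhs => rw [digitsLoop.eq_def]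
      simp [h, listLoop]

theorem runMin_eq_or_mem (ds : List Int) (md : Int) :
    ds.foldl min md = md ∨ ds.foldl min md ∈ ds := by
  induction ds generalizing md with
  | nil => left; rfl
  | cons d ds ih =>
    simp only [List.foldl_cons]
    rcases ih (min md d) with h | h
    · rw [h]
      rcases le_total md d with hc | hc
      · left; simp [min_eq_left hc]
      · right; simp [min_eq_right hc]
    · right; exact List.mem_cons_of_mem _ h

theorem runMin_le (ds : List Int) (md : Int) : ds.foldl min md ≤ md := by
  induction ds generalizing md with
  | nil => exact le_refl _
  | cons d ds ih =>
    simp only [List.foldl_cons]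
    exact le_trans (ih (min md d)) (min_le_left _ _)

theorem runMin_le_mem (ds : List Int) (md x : Int) : x ∈ ds → ds.foldl min md ≤ x := by
  induction ds generalizing md with
  | nil => intro hx; cases hx
  | cons d ds ih =>
    intro hx
    simp only [List.foldl_cons]
    rcases List.mem_cons.mp hx with rfl | hx
    · exact le_trans (runMin_le _ _) (min_le_right _ _)
    · exact ih _ hx

theorem lastEq_eq_none_iff (ds : List Int) (m : Int) :
    lastEq ds m = none ↔ m ∉ ds := by
  induction ds with
  | nil => simp [lastEq]
  | cons d ds ih =>
    rw [lastEq]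
    rcases h : lastEq ds m with _ | k
    · have hm : m ∉ ds := ih.mp h
      by_cases hd : d = m
      · subst hd; simp [hm]
      · simp [hm, Ne.symm hd, hd]
    · have hmem : m ∈ ds := by
        by_contra hm
        rw [ih.mpr hm] at h; cases h
      simp [List.mem_cons, hmem]

theorem listLoop_char (ds : List Int) (md idx pos : Int) :
    listLoop ds md idx pos =
      match lastEq ds (ds.foldl min md) with
      | none => idx
      | some k => pos + 1 + (k : Int) := by
  induction ds generalizing md idx pos with
  | nil => rfl
  | cons d ds ih =>
    by_cases hle : d ≤ md
    · simp only [List.foldl_cons, listLoop, if_pos hle, lastEq, min_eq_right hle]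
      rw [ih]
      rcases h : lastEq ds (ds.foldl min d) with _ | k
      · have hmem : ds.foldl min d = d := by
          rcases runMin_eq_or_mem ds d with h' | h'
          · exact h'
          · exact absurd h' ((lastEq_eq_none_iff _ _).mp h)
        simp [hmem]
      · push_cast; ring
    · simp only [List.foldl_cons, listLoop, if_neg hle, lastEq, min_eq_left (not_le.mp hle).le]
      rw [ih]
      rcases h : lastEq ds (ds.foldl min md) with _ | k
      · have hmd : ds.foldl min md = md := by
          rcases runMin_eq_or_mem ds md with h' | h'
          · exact h'
          · exact absurd h' ((lastEq_eq_none_iff _ _).mp h)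
        have hne : ¬ d = ds.foldl min md := by rw [hmd]; omega
        simp [hne]
      · push_cast; ring

theorem lastEq_eq_reverse_index (ds : List Int) (m : Int) :
    lastEq ds m = (PySem.List.index? ds.reverse m).map (fun j => ds.length - 1 - j) := by
  induction ds with
  | nil => simp [lastEq, PySem.List.index?_eq_idxOf?]
  | cons d ds ih =>
    rw [lastEq, List.reverse_cons]
    by_cases hm : m ∈ ds
    · have hmr : m ∈ ds.reverse := List.mem_reverse.mpr hm
      rw [PySem.List.index?_append_of_mem _ hmr]
      rcases hj : PySem.List.index? ds.reverse m with _ | j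
      · exact absurd hmr ((PySem.List.index?_eq_none_iff _ _).mp hj)
      · obtain ⟨hjlt, -, -⟩ := PySem.List.getElem_of_index?_eq_some hj
        rw [hj] at ih
        have hk : lastEq ds m = some (ds.length - 1 - j) := by simpa using ih
        rw [hk]
        simp only [Option.map_some, List.length_cons]
        congr 1
        rw [List.length_reverse] at hjlt
        omega
    · have hnone : lastEq ds m = none := (lastEq_eq_none_iff _ _).mpr hm
      rw [hnone]
      by_cases hd : d = m
      · subst hd
        rw [PySem.List.index?_append_singleton_self ds.reverse d (by simpa using hm)]
        simp [List.length_reverse]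
      · have hz : PySem.List.index? (ds.reverse ++ [d]) m = none := by
          rw [PySem.List.index?_eq_none_iff]
          simp only [List.mem_append, List.mem_reverse, List.mem_singleton]
          exact fun h' => h'.elim hm (fun h'' => hd h''.symm)
        rw [hz]
        simp [hd]

-- the minimum VALUE of a nonempty digit list equals A's running minimum seeded with the head
theorem min?_eq_runMin (d : Int) (ds : List Int) (m : Int)
    (h : PySem.List.min? (d :: ds) id = some m) :
    (d :: ds).foldl min d = m := by
  have hmem : m ∈ d :: ds := PySem.List.min?_mem h
  have hmin : ∀ y ∈ d :: ds, m ≤ y := by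
    intro y hy
    simpa using PySem.List.min?_isMin h y hy
  have h1 : (d :: ds).foldl min d ≤ m := runMin_le_mem _ _ _ hmem
  have h2 : m ≤ (d :: ds).foldl min d := by
    rcases runMin_eq_or_mem (d :: ds) d with h' | h'
    · rw [h']; exact hmin d List.mem_cons_self
    · exact hmin _ h'
  omega

-- ===== VERDICT (by name: the statement is the Claim_ definition above) =====
theorem min_digit_index_spec : Claim_equal_min_digit_index := by
  intro n _
  unfold Spec_min_digit_index min_digit_index min_digit_index_alt
  by_cases h : n > 0
  · rcases hds : digitsLoop n [] with _ | ⟨d, rest⟩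
    · rw [digitsLoop_pos n h] at hds; cases hds
    · have hd : d = PySem.Int.mod n 10 := by
        rw [digitsLoop_pos n h] at hds
        exact (List.cons.injEq _ _ _ _ ▸ hds).1.symm
      rw [minDigitIndexLoop_eq_listLoop n.toNat n rfl, hds, listLoop_char]
      simp only [List.isEmpty_cons, if_false, Bool.false_eq_true]
      rcases hm : PySem.List.min? (d :: rest) id with _ | m
      · exact absurd hm (by simp [PySem.List.min?_eq_none_iff])
      · have hrun : (d :: rest).foldl min d = m := min?_eq_runMin d rest m hm
        rw [← hd, hrun]
        rw [PySem.List.slice?_none_none_neg_one]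
        simp only [Option.getD_some]
        rw [lastEq_eq_reverse_index]
        rcases hj : PySem.List.index? (d :: rest).reverse m with _ | j
        · have hmemr : m ∈ (d :: rest).reverse := by
            rw [List.mem_reverse]
            have hor := runMin_eq_or_mem (d :: rest) d
            rw [hrun] at hor
            rcases hor with h' | h'
            · rw [← h']; exact List.mem_cons_self
            · exact h'
          exact absurd hmemr ((PySem.List.index?_eq_none_iff _ _).mp hj)
        · obtain ⟨hjlt, -, -⟩ := PySem.List.getElem_of_index?_eq_some hj
          rw [List.length_reverse] at hjlt
          simp only [Option.map_some, PySem.List.len_eq, List.length_cons]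
          simp only [List.length_cons] at hjlt
          have hjle : j ≤ rest.length := by omega
          push_cast [Nat.cast_sub hjle]
          ring
  · conv_lhs => rw [minDigitIndexLoop.eq_def]
    conv_rhs => rw [digitsLoop.eq_def]
    simp [h]
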